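-- pv_equiv track=rewrite | github.com/ejaszewski/ruthless | util/board_cosnt_gen.py | down_right
-- ===== SOURCE A (Python) =====
-- def down_right(pos):
--     x = pos // 8
--     y = pos % 8
--     bs = ''
--     for i in range(0, 8):
--         for j in range(0, 8):
--             if i - x > 0 and (x - i == y - j):
--                 bs += '1'
--             else:
--                 bs += '0'
--         # bs += '\n'
--     return bs
-- ===== SOURCE B (Python) =====
-- def down_right(pos):
--     x = pos // 8
--     y = pos % 8
--     buf = ['0'] * 64
--     for i in range(8):
--         j = y + (i - x)
--         if i > x and j < 8:
--             buf[i * 8 + j] = '1'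
--     return ''.join(buf)
-- ===== Notes on version B (the rewrite author's own statement) =====
-- stated objective: simpler
-- what changed: B walks only the 8 rows and computes the single diagonal column j=y+(i-x) arithmetically, placing '1' into a preallocated 64-char buffer, instead of scanning all 64 cells and testing a predicate on each.
import Mathlib
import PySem

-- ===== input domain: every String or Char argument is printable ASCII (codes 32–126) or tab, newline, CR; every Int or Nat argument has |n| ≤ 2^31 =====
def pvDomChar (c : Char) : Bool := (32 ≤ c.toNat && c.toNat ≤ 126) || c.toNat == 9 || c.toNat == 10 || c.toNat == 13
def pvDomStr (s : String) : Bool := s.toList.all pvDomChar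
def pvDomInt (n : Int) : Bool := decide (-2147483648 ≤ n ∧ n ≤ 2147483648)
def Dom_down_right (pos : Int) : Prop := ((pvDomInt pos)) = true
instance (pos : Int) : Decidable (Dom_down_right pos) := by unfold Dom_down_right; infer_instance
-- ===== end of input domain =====

-- B builds the mask by walking the 8 rows and computing the diagonal column
-- arithmetically into a preallocated buffer, instead of scanning all 64 cells
-- with a predicate (objective: simpler).

-- ===== PORT A =====
def down_right (pos : Int) : String :=
  let x := PySem.Int.floordiv pos 8
  let y := PySem.Int.mod pos 8
  (PySem.List.pyRange 0 8 1).foldl (fun bs i =>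
    (PySem.List.pyRange 0 8 1).foldl (fun bs j =>
      if i - x > 0 ∧ x - i = y - j then bs ++ "1" else bs ++ "0") bs) ""

-- ===== PORT B =====
-- Python's `buf[i*8+j] = '1'`: under the guard i > x ∧ j < 8 (with 0 ≤ y = pos % 8 < 8)
-- the index i*8+j is nonnegative and < 64, so List.set with .toNat is exact here.
def down_right_alt (pos : Int) : String :=
  let x := PySem.Int.floordiv pos 8
  let y := PySem.Int.mod pos 8
  let buf := (PySem.List.pyRange 0 8 1).foldl (fun buf i =>
    let j := y + (i - x)
    if i > x ∧ j < 8 then buf.set (i * 8 + j).toNat '1' else buf)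
    (List.replicate 64 '0')
  String.mk buf

-- ===== PRECONDITION & SPEC =====
def Spec_down_right (pos : Int) (out : String) : Prop := out = down_right_alt pos
instance (pos : Int) (out : String) : Decidable (Spec_down_right pos out) := by unfold Spec_down_right; infer_instance

-- ===== CLAIM (what is proved, stated in full; the proofs are below) =====
def Claim_equal_down_right : Prop := ∀ (pos : Int), Dom_down_right pos → Spec_down_right pos (down_right pos)

-- ===== LEMMAS AND PROOFS =====

-- A's loop body as a function of x = pos // 8, y = pos % 8
def coreA (x y : Int) : String :=
  (PySem.List.pyRange 0 8 1).foldl (fun bs i =>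
    (PySem.List.pyRange 0 8 1).foldl (fun bs j =>
      if i - x > 0 ∧ x - i = y - j then bs ++ "1" else bs ++ "0") bs) ""

-- B's loop body as a function of x, y
def coreB (x y : Int) : String :=
  String.mk ((PySem.List.pyRange 0 8 1).foldl (fun buf i =>
    let j := y + (i - x)
    if i > x ∧ j < 8 then buf.set (i * 8 + j).toNat '1' else buf)
    (List.replicate 64 '0'))

theorem down_right_eq_coreA (pos : Int) :
    down_right pos = coreA (PySem.Int.floordiv pos 8) (PySem.Int.mod pos 8) := rfl

theorem down_right_alt_eq_coreB (pos : Int) :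
    down_right_alt pos = coreB (PySem.Int.floordiv pos 8) (PySem.Int.mod pos 8) := rfl

-- both cores only depend on x through its clamp into [-8, 8]
def clampX (x : Int) : Int := if x < -8 then -8 else if x > 8 then 8 else x

theorem clampX_bounds (x : Int) : -8 ≤ clampX x ∧ clampX x ≤ 8 := by
  unfold clampX; split_ifs <;> omega

theorem clampX_eq_of_mid (x : Int) (h1 : ¬ x < -8) (h2 : ¬ x > 8) : clampX x = x := by
  unfold clampX; rw [if_neg h1, if_neg h2]

theorem coreA_clamp (x y : Int) (hy0 : 0 ≤ y) (hy : y < 8) :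
    coreA x y = coreA (clampX x) y := by
  unfold coreA
  apply PySem.List.foldl_congr_mem
  intro acc i hi
  rw [PySem.List.mem_pyRange_one] at hi
  apply PySem.List.foldl_congr_mem
  intro acc2 j hj
  rw [PySem.List.mem_pyRange_one] at hj
  by_cases h1 : x < -8
  · have hc : clampX x = -8 := by unfold clampX; rw [if_pos h1]
    rw [hc, if_neg (by omega), if_neg (by omega)]
  · by_cases h2 : x > 8
    · have hc : clampX x = 8 := by unfold clampX; rw [if_neg h1, if_pos h2]
      rw [hc, if_neg (by omega), if_neg (by omega)]
    · rw [clampX_eq_of_mid x h1 h2]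

theorem coreB_clamp (x y : Int) (hy0 : 0 ≤ y) (hy : y < 8) :
    coreB x y = coreB (clampX x) y := by
  unfold coreB
  congr 1
  apply PySem.List.foldl_congr_mem
  intro acc i hi
  rw [PySem.List.mem_pyRange_one] at hi
  by_cases h1 : x < -8
  · have hc : clampX x = -8 := by unfold clampX; rw [if_pos h1]
    simp only [hc]
    rw [if_neg (by omega), if_neg (by omega)]
  · by_cases h2 : x > 8
    · have hc : clampX x = 8 := by unfold clampX; rw [if_neg h1, if_pos h2]
      simp only [hc]
      rw [if_neg (by omega), if_neg (by omega)]
    · rw [clampX_eq_of_mid x h1 h2]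

theorem core_eq_small :
    ∀ a : Nat, a < 17 → ∀ b : Nat, b < 8 →
      coreA ((a : Int) - 8) (b : Int) = coreB ((a : Int) - 8) (b : Int) := by decide

-- ===== VERDICT (by name: the statement is the Claim_ definition above) =====
theorem down_right_spec : Claim_equal_down_right := by
  intro pos _
  unfold Spec_down_right
  rw [down_right_eq_coreA, down_right_alt_eq_coreB]
  set x := PySem.Int.floordiv pos 8 with hx
  set y := PySem.Int.mod pos 8 with hyd
  have hy0 : 0 ≤ y := PySem.Int.mod_nonneg pos (by norm_num)
  have hy : y < 8 := PySem.Int.mod_lt pos (by norm_num)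
  rw [coreA_clamp x y hy0 hy, coreB_clamp x y hy0 hy]
  obtain ⟨hc1, hc2⟩ := clampX_bounds x
  have h := core_eq_small (clampX x + 8).toNat (by omega) y.toNat (by omega)
  rw [Int.toNat_of_nonneg (by omega : (0:Int) ≤ clampX x + 8),
      Int.toNat_of_nonneg hy0] at h
  simpa using h
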